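-- pv_equiv track=rewrite | github.com/JoaoDaviMNunes/AES_decrypt | divisor_chaves_strong.py | get_initial_keys
-- ===== SOURCE A (Python) =====
-- import string
--
-- charset = string.ascii_letters + string.digits  # 62 caracteres possíveis
--
-- def get_initial_keys(start_key, num_keys_per_group, num_groups):
--     start_key_suffix = start_key[10:]  # Pegando os 6 caracteres finais da chave
--     start_number = 0
--
--     # Convertendo a chave inicial (Security00aaaaaa) para um número base 62
--     for i, char in enumerate(start_key_suffix):
--         start_number = start_number * 62 + charset.index(char)
--
--     initial_keys = []
--     for group in range(num_groups):
--         # Calculando o número da chave inicial para o grupo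
--         key_number = start_number + group * num_keys_per_group
--         new_suffix = []
--         # Convertendo o número de volta para uma chave no formato base62
--         for _ in range(6):
--             new_suffix.insert(0, charset[key_number % 62])
--             key_number //= 62
--         initial_key = start_key[:10] + ''.join(new_suffix)
--         initial_keys.append(initial_key)
--
--     return initial_keys
-- ===== SOURCE B (Python) =====
-- import string
--
-- charset = string.ascii_letters + string.digits  # 62 caracteres possíveis
--
-- def get_initial_keys(start_key, num_keys_per_group, num_groups):
--     prefix = start_key[:10]
--     tail = start_key[10:][-6:]
--     # digit-array odometer: the last 6 suffix chars ARE the 6 low base-62 digits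
--     digits = [0] * (6 - len(tail)) + [charset.index(c) for c in tail]
--     keys = []
--     for _ in range(num_groups):
--         keys.append(prefix + ''.join(charset[d] for d in digits))
--         carry = num_keys_per_group
--         for i in range(5, -1, -1):
--             carry, digits[i] = divmod(digits[i] + carry, 62)
--     return keys
-- ===== Notes on version B (the rewrite author's own statement) =====
-- stated objective: alternative
-- what changed: B never forms a base-62 integer at all: it reads the last 6 suffix characters directly as a 6-digit array (they ARE the low digits of A's start_number mod 62^6), emits keys by mapping the digit array through the charset, and advances between groups by ripple-carry addition of the step through the digit array (overflow past digit 6 discarded), replacing A's per-group arithmetic re-conversion (multiply, add, six divmods of an unbounded integer) with an odometer on bounded digits.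
-- outside the precondition, e.g. on get_initial_keys('Security00!aaaaaaa', 1, 1): A raises ValueError, B returns ['Security00aaaaaa']
import Mathlib
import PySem

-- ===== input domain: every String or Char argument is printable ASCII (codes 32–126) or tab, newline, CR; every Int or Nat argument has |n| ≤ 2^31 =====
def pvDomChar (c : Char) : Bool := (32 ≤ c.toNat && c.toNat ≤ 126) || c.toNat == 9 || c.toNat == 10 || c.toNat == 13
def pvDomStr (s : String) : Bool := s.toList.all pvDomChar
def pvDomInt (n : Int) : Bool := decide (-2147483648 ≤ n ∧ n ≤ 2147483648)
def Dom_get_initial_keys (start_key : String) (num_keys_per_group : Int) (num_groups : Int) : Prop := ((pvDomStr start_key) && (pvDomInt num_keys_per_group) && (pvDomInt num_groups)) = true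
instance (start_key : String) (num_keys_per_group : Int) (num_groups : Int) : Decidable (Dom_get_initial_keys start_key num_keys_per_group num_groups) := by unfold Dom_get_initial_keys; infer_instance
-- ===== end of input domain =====

-- B never forms a base-62 integer: it reads the last 6 suffix characters as a digit array
-- (they are the low base-62 digits) and advances between groups by ripple-carry addition
-- of the step through that array, discarding overflow — an odometer instead of A's
-- per-group integer arithmetic and re-conversion (objective: alternative).

-- ===== PORT A =====
-- charset = string.ascii_letters + string.digits
def pvCharset : List Char :=
  "abcdefghijklmnopqrstuvwxyzABCDEFGHIJKLMNOPQRSTUVWXYZ0123456789".toList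

-- the inner 'for _ in range(6)' loop of A: insert charset[k % 62] at the front, k //= 62
def pvDigitsA (k : Int) : List Char :=
  ((List.range 6).foldl
    (fun (st : List Char × Int) _ =>
      (pvCharset.getD (PySem.Int.mod st.2 62).toNat ' ' :: st.1, PySem.Int.floordiv st.2 62))
    ([], k)).1

def get_initial_keys (start_key : String) (num_keys_per_group : Int) (num_groups : Int) : List String :=
  let start_key_suffix : List Char := PySem.List.slice start_key.toList (some 10) none
  -- for i, char in enumerate(...): start_number = start_number * 62 + charset.index(char)
  -- (charset.index raises for a char outside charset: excluded by Pre_; .getD 0 is unreachable there)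
  let start_number : Int :=
    (PySem.List.enumerate start_key_suffix 0).foldl
      (fun acc p => acc * 62 + (((PySem.List.index? pvCharset p.2).getD 0 : Nat) : Int)) 0
  (PySem.List.pyRange 0 num_groups 1).foldl
    (fun initial_keys group =>
      initial_keys ++
        [String.ofList (PySem.List.slice start_key.toList none (some 10) ++
          pvDigitsA (start_number + group * num_keys_per_group))])
    []

-- ===== PORT B =====
-- charset[d] for a digit d (always 0 ≤ d < 62 under Pre_)
def pvEnc (d : Int) : Char := pvCharset.getD d.toNat ' '

-- the inner 'for i in range(5, -1, -1): carry, digits[i] = divmod(digits[i] + carry, 62)'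
-- loop of Source B, transcribed on the reversed digit list (i runs from the last digit down);
-- the final carry is discarded
def pvRipple (carry : Int) : List Int → List Int
  | [] => []
  | d :: rest =>
      PySem.Int.mod (d + carry) 62 :: pvRipple (PySem.Int.floordiv (d + carry) 62) rest

def pvOdoAdd (step : Int) (digits : List Int) : List Int :=
  (pvRipple step digits.reverse).reverse

-- the 'for _ in range(num_groups)' loop of Source B, threading the digit array
def pvLoopB (pref : List Char) (step : Int) : Nat → List Int → List String
  | 0, _ => []
  | n + 1, ds => String.ofList (pref ++ ds.map pvEnc) :: pvLoopB pref step n (pvOdoAdd step ds)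

def get_initial_keys_alt (start_key : String) (num_keys_per_group : Int) (num_groups : Int) : List String :=
  let pref : List Char := PySem.List.slice start_key.toList none (some 10)
  let tail : List Char :=
    PySem.List.slice (PySem.List.slice start_key.toList (some 10) none) (some (-6)) none
  let digits : List Int :=
    List.replicate (6 - tail.length) 0 ++
      tail.map (fun c => (((PySem.List.index? pvCharset c).getD 0 : Nat) : Int))
  pvLoopB pref num_keys_per_group num_groups.toNat digits

-- ===== PRECONDITION & SPEC =====
-- Pre_ excludes exactly the inputs where Python A raises ValueError: a character of
-- start_key[10:] outside charset (charset.index raises there).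
def Pre_get_initial_keys (start_key : String) (num_keys_per_group : Int) (num_groups : Int) : Prop :=
  ((start_key.toList.drop 10).all (fun c => pvCharset.contains c)) = true
instance (start_key : String) (num_keys_per_group : Int) (num_groups : Int) : Decidable (Pre_get_initial_keys start_key num_keys_per_group num_groups) := by unfold Pre_get_initial_keys; infer_instance

def pvWitness_get_initial_keys : String × Int × Int := ("Security00aaaaab", 5, 3)

def Spec_get_initial_keys (start_key : String) (num_keys_per_group : Int) (num_groups : Int) (out : List String) : Prop := out = get_initial_keys_alt start_key num_keys_per_group num_groups
instance (start_key : String) (num_keys_per_group : Int) (num_groups : Int) (out : List String) : Decidable (Spec_get_initial_keys start_key num_keys_per_group num_groups out) := by unfold Spec_get_initial_keys; infer_instance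

-- ===== CLAIM (what is proved, stated in full; the proofs are below) =====
def Claim_equal_get_initial_keys : Prop := ∀ (start_key : String) (num_keys_per_group : Int) (num_groups : Int), Dom_get_initial_keys start_key num_keys_per_group num_groups → Pre_get_initial_keys start_key num_keys_per_group num_groups → Spec_get_initial_keys start_key num_keys_per_group num_groups (get_initial_keys start_key num_keys_per_group num_groups)

-- ===== LEMMAS AND PROOFS =====

-- the base-62 value of a big-endian digit list
def pvVal (ds : List Int) : Int := ds.foldl (fun a d => a * 62 + d) 0

def pvInRange (ds : List Int) : Prop := ∀ d ∈ ds, 0 ≤ d ∧ d < 62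

lemma pvVal_shift (ds : List Int) : ∀ acc : Int,
    ds.foldl (fun a d => a * 62 + d) acc = acc * 62 ^ ds.length + pvVal ds := by
  induction ds with
  | nil => intro acc; simp [pvVal]
  | cons d t ih =>
      intro acc
      have h1 := ih (acc * 62 + d)
      have h2 := ih (0 * 62 + d)
      simp only [pvVal, List.foldl_cons, List.length_cons] at *
      rw [h1, h2]; ring

lemma pvVal_bounds (ds : List Int) (h : pvInRange ds) :
    0 ≤ pvVal ds ∧ pvVal ds < 62 ^ ds.length := by
  induction ds with
  | nil => simp [pvVal]
  | cons d t ih =>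
      obtain ⟨hd0, hd1⟩ := h d (by simp)
      obtain ⟨h0, h1⟩ := ih (fun x hx => h x (by simp [hx]))
      have hs := pvVal_shift t d
      have hp : (0:Int) < 62 ^ t.length := pow_pos (by norm_num) _
      simp only [pvVal, List.foldl_cons, List.length_cons] at *
      rw [show (0:Int) * 62 + d = d by ring, hs]
      have hub := mul_le_mul_of_nonneg_right (by omega : d ≤ 61) hp.le
      constructor
      · have := mul_nonneg hd0 hp.le; omega
      · rw [pow_succ]; nlinarith

-- A's 6-digit extraction equals encoding any in-range 6-digit list with the same value mod 62^6
lemma pvDigitsA_eq_map_enc (k : Int) (ds : List Int) (hlen : ds.length = 6)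
    (hr : pvInRange ds) (hv : pvVal ds = k % 62 ^ 6) :
    pvDigitsA k = ds.map pvEnc := by
  match ds, hlen with
  | [d0, d1, d2, d3, d4, d5], _ =>
    have hb : ∀ d ∈ [d0, d1, d2, d3, d4, d5], 0 ≤ d ∧ d < 62 := hr
    have h0 := hb d0 (by simp); have h1 := hb d1 (by simp); have h2 := hb d2 (by simp)
    have h3 := hb d3 (by simp); have h4 := hb d4 (by simp); have h5 := hb d5 (by simp)
    simp only [pvVal, List.foldl_cons, List.foldl_nil] at hv
    have hfd : ∀ a : Int, PySem.Int.floordiv a 62 = a / 62 :=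
      fun a => PySem.Int.floordiv_eq_ediv_of_pos (by norm_num)
    have hm : ∀ a : Int, PySem.Int.mod a 62 = a % 62 :=
      fun a => PySem.Int.mod_eq_emod_of_pos (by norm_num)
    simp only [pvDigitsA, List.range_succ, List.foldl_append, List.foldl_cons, List.foldl_nil,
      List.range_zero, List.map_cons, List.map_nil, hfd, hm, pvEnc, List.cons.injEq, and_true]
    refine ⟨?_, ?_, ?_, ?_, ?_, ?_⟩ <;> (congr 1; omega)

lemma pvInRange_ripple (c : Int) (ds : List Int) : pvInRange (pvRipple c ds) := by
  induction ds generalizing c with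
  | nil => intro d hd; simp [pvRipple] at hd
  | cons d t ih =>
      intro x hx
      simp only [pvRipple, List.mem_cons] at hx
      rcases hx with h | h
      · subst h
        exact ⟨PySem.Int.mod_nonneg _ (by norm_num), PySem.Int.mod_lt _ (by norm_num)⟩
      · exact ih _ x h

-- the little-endian value of a list (pvRipple works on the reversed digits)
def pvValLE : List Int → Int
  | [] => 0
  | d :: t => pvValLE t * 62 + d

lemma pvVal_reverse (ds : List Int) : pvVal ds.reverse = pvValLE ds := by
  induction ds with
  | nil => rfl
  | cons d t ih =>
      rw [List.reverse_cons, pvVal, List.foldl_append, ← pvVal, ih, List.foldl_cons,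
        List.foldl_nil, pvValLE]

lemma pvRipple_val (ds : List Int) : ∀ c : Int,
    pvValLE (pvRipple c ds) = (pvValLE ds + c) % 62 ^ ds.length := by
  induction ds with
  | nil => intro c; simp [pvRipple, pvValLE]
  | cons d t ih =>
      intro c
      have hfd := PySem.Int.floordiv_eq_ediv_of_pos (a := d + c) (b := 62) (by norm_num)
      have hm := PySem.Int.mod_eq_emod_of_pos (a := d + c) (b := 62) (by norm_num)
      show pvValLE (pvRipple (PySem.Int.floordiv (d + c) 62) t) * 62 + PySem.Int.mod (d + c) 62
        = (pvValLE t * 62 + d + c) % 62 ^ (t.length + 1)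
      rw [hfd, hm, ih ((d + c) / 62)]
      have h62 : (0:Int) < 62 ^ t.length := pow_pos (by norm_num) _
      have hq : (d + c) / 62 * 62 + (d + c) % 62 = d + c := by omega
      set n := t.length
      set v := pvValLE t
      set q := (d + c) / 62 with hqdef
      set r := (d + c) % 62 with hrdef
      have hr0 : 0 ≤ r := Int.emod_nonneg _ (by norm_num)
      have hr1 : r < 62 := Int.emod_lt_of_pos _ (by norm_num)
      have e1 : v * 62 + d + c = (v + q) * 62 + r := by rw [add_mul]; omega
      rw [e1]
      have hdm := Int.ediv_add_emod (v + q) (62 ^ n)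
      set w := (v + q) % 62 ^ n with hwdef
      set u := (v + q) / 62 ^ n with hudef
      have hw0 : 0 ≤ w := Int.emod_nonneg _ (by positivity)
      have hw1 : w < 62 ^ n := Int.emod_lt_of_pos _ h62
      have e2 : (v + q) * 62 + r = (w * 62 + r) + 62 ^ (n + 1) * u := by
        rw [pow_succ]; nlinarith [hdm]
      rw [e2, Int.add_mul_emod_self_left]
      exact (Int.emod_eq_of_lt (by nlinarith) (by rw [pow_succ]; nlinarith)).symm

lemma pvRipple_len (c : Int) (xs : List Int) : (pvRipple c xs).length = xs.length := by
  induction xs generalizing c with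
  | nil => rfl
  | cons d t ih => simp [pvRipple, ih]

lemma pvOdoAdd_len (step : Int) (ds : List Int) : (pvOdoAdd step ds).length = ds.length := by
  unfold pvOdoAdd
  rw [List.length_reverse, pvRipple_len, List.length_reverse]

lemma pvOdoAdd_inRange (step : Int) (ds : List Int) : pvInRange (pvOdoAdd step ds) := by
  intro x hx
  unfold pvOdoAdd at hx
  rw [List.mem_reverse] at hx
  exact pvInRange_ripple step ds.reverse x hx

lemma pvOdoAdd_val (step : Int) (ds : List Int) :
    pvVal (pvOdoAdd step ds) = (pvVal ds + step) % 62 ^ ds.length := by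
  unfold pvOdoAdd
  rw [pvVal_reverse, pvRipple_val ds.reverse step, ← pvVal_reverse, List.reverse_reverse,
    List.length_reverse]

-- decode loop: the enumerate form (A) equals the plain fold over the characters
lemma pvDecode_enum_eq (xs : List Char) : ∀ (s acc : Int),
    (PySem.List.enumerate xs s).foldl
      (fun acc p => acc * 62 + (((PySem.List.index? pvCharset p.2).getD 0 : Nat) : Int)) acc
    = xs.foldl (fun acc c => acc * 62 + (((PySem.List.index? pvCharset c).getD 0 : Nat) : Int)) acc := by
  induction xs with
  | nil => intro s acc; rfl
  | cons x t ih =>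
      intro s acc
      rw [PySem.List.enumerate_cons, List.foldl_cons, List.foldl_cons, ih]

lemma pvIdx_bounds (c : Char) (hc : c ∈ pvCharset) :
    0 ≤ (((PySem.List.index? pvCharset c).getD 0 : Nat) : Int) ∧
    (((PySem.List.index? pvCharset c).getD 0 : Nat) : Int) < 62 := by
  obtain ⟨k, hk⟩ := Option.isSome_iff_exists.mp ((PySem.List.index?_isSome_iff pvCharset c).mpr hc)
  obtain ⟨hlt, -, -⟩ := PySem.List.getElem_of_index?_eq_some hk
  rw [hk]
  simp only [Option.getD_some]
  constructor
  · positivity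
  · exact_mod_cast (by exact_mod_cast hlt : k < 62)

lemma pvM_lit : (62:Int) ^ 6 = 56800235584 := by norm_num

-- B's group loop produces A's per-group keys (the central invariant)
lemma pvLoopB_eq (pref : List Char) (step : Int) : ∀ (n : Nat) (ds : List Int) (w : Int),
    ds.length = 6 → pvInRange ds → pvVal ds = w % 62 ^ 6 →
    pvLoopB pref step n ds
    = (List.range n).map (fun (g : Nat) => String.ofList (pref ++ pvDigitsA (w + (g : Int) * step))) := by
  intro n
  induction n with
  | zero => intro ds w _ _ _; simp [pvLoopB]
  | succ m ih =>
      intro ds w hlen hr hv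
      rw [List.range_succ_eq_map, List.map_cons]
      rw [show pvLoopB pref step (m + 1) ds
            = String.ofList (pref ++ ds.map pvEnc) :: pvLoopB pref step m (pvOdoAdd step ds) from rfl]
      have hv' : pvVal (pvOdoAdd step ds) = (w + step) % 62 ^ 6 := by
        rw [pvOdoAdd_val step ds, hlen, hv, pvM_lit]
        omega
      rw [ih (pvOdoAdd step ds) (w + step) (by rw [pvOdoAdd_len, hlen]) (pvOdoAdd_inRange step ds) hv']
      rw [List.map_map]
      refine List.cons_eq_cons.mpr ⟨?_, ?_⟩
      · simp only [Nat.cast_zero, zero_mul, add_zero]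
        rw [pvDigitsA_eq_map_enc w ds hlen hr hv]
      · apply List.map_congr_left
        intro g _
        simp only [Function.comp]
        congr 2
        push_cast
        ring_nf

-- leading zero digits do not change the value
lemma pvVal_pad (n : Nat) (xs : List Int) : pvVal (List.replicate n 0 ++ xs) = pvVal xs := by
  induction n with
  | zero => simp
  | succ m ih => simpa [pvVal, List.replicate_succ] using ih

set_option maxHeartbeats 1000000 in
theorem get_initial_keys_spec : Claim_equal_get_initial_keys := by
  intro sk step n _dom pre
  simp only [Spec_get_initial_keys, get_initial_keys, get_initial_keys_alt]
  rw [pvDecode_enum_eq, PySem.List.foldl_append_singleton_eq_map, PySem.List.pyRange_one]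
  simp only [Int.sub_zero, List.map_map]
  set cs := sk.toList with hcs
  have hmem : ∀ c ∈ cs.drop 10, c ∈ pvCharset := by
    intro c hc
    have := List.all_eq_true.mp pre c hc
    simpa [List.contains_iff_mem] using this
  set idx : Char → Int := fun c => (((PySem.List.index? pvCharset c).getD 0 : Nat) : Int) with hidx
  set suf := PySem.List.slice cs (some 10) none with hsuf
  have hsufdrop : suf = cs.drop 10 := PySem.List.slice_from_natCast cs 10
  set W : Int := suf.foldl (fun acc c => acc * 62 + idx c) 0 with hW
  rw [PySem.List.slice_from_neg_ofNat _ 6 (by norm_num)]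
  set tl := suf.drop (suf.length - 6) with htl
  set ds := List.replicate (6 - tl.length) 0 ++ tl.map idx with hds
  have htlsub : ∀ c ∈ tl, c ∈ pvCharset := by
    intro c hc
    exact hmem c (by rw [← hsufdrop]; exact List.mem_of_mem_drop hc)
  have hrtl : pvInRange (tl.map idx) := by
    intro d hd
    obtain ⟨c, hc, rfl⟩ := List.mem_map.mp hd
    exact pvIdx_bounds c (htlsub c hc)
  have hrds : pvInRange ds := by
    intro d hd
    rw [hds, List.mem_append] at hd
    rcases hd with h | h
    · rw [List.eq_of_mem_replicate h]; norm_num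
    · exact hrtl d h
  have htllen : tl.length ≤ 6 := by
    rw [htl, List.length_drop]; omega
  have hdslen : ds.length = 6 := by
    rw [hds, List.length_append, List.length_replicate, List.length_map]; omega
  have hfold : W = pvVal (suf.map idx) := by
    rw [hW, pvVal, List.foldl_map]
  obtain ⟨hb0, hb1⟩ := pvVal_bounds (tl.map idx) hrtl
  rw [List.length_map] at hb1
  have hWval : pvVal ds = W % 62 ^ 6 := by
    rw [hds, pvVal_pad]
    have hval2 : pvVal (suf.map idx) =
        pvVal ((suf.take (suf.length - 6)).map idx) * 62 ^ (tl.map idx).length + pvVal (tl.map idx) := by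
      conv_lhs => rw [show suf = suf.take (suf.length - 6) ++ tl from (List.take_append_drop _ _).symm]
      rw [List.map_append, pvVal, List.foldl_append]
      rw [show List.foldl (fun a d => a * 62 + d) 0 ((suf.take (suf.length - 6)).map idx)
            = pvVal ((suf.take (suf.length - 6)).map idx) from rfl]
      exact pvVal_shift (tl.map idx) _
    by_cases h6 : 6 ≤ suf.length
    · have htl6 : tl.length = 6 := by rw [htl, List.length_drop]; omega
      rw [hfold, hval2, List.length_map, htl6]
      rw [show pvVal ((suf.take (suf.length - 6)).map idx) * 62 ^ 6 + pvVal (tl.map idx)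
            = pvVal (tl.map idx) + 62 ^ 6 * pvVal ((suf.take (suf.length - 6)).map idx) by ring]
      rw [Int.add_mul_emod_self_left]
      exact (Int.emod_eq_of_lt hb0 (by rw [← htl6]; exact hb1)).symm
    · have htlsuf : tl = suf := by
        rw [htl, show suf.length - 6 = 0 by omega, List.drop_zero]
      rw [hfold, ← htlsuf]
      have hle : (62:Int) ^ tl.length ≤ 62 ^ 6 := by
        apply pow_le_pow_right₀ (by norm_num)
        exact htllen
      exact (Int.emod_eq_of_lt hb0 (lt_of_lt_of_le hb1 hle)).symm
  rw [pvLoopB_eq _ step n.toNat ds W hdslen hrds hWval]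
  apply List.map_congr_left
  intro g _
  simp only [Function.comp_apply]
  rw [show W + (0 + (g:Int)) * step = W + (g:Int) * step from by ring]
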